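-- pv_equiv track=rewrite | github.com/cwnu-airlab/NLTKo | nltk/tag/espresso/espresso_tag.py | _dependency_after
-- ===== SOURCE A (Python) =====
-- def _dependency_after(list):
--     len_list = len(list)
--     temp_list = []
--     repeat = len_list//3
--     for i in range(repeat):
--         index = i*3
--         tup1 = (i+1, )
--         tup2 = tuple(list[index:index+3])
--         tup = tup1 + tup2
--         temp_list.append(tup[:])
--
--
--     return temp_list
-- ===== SOURCE B (Python) =====
-- def _dependency_after(list):
--     return [(i, a, b, c) for i, (a, b, c) in enumerate(zip(*[iter(list)] * 3), 1)]
-- ===== Notes on version B (the rewrite author's own statement) =====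
-- stated objective: idiomatic
-- what changed: Replaces the index-arithmetic loop with slicing by an iterator-grouping comprehension: zip over one shared iterator emits consecutive triples (dropping the <3 leftover) and enumerate(...,1) supplies the 1-based prefix.
import Mathlib
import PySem

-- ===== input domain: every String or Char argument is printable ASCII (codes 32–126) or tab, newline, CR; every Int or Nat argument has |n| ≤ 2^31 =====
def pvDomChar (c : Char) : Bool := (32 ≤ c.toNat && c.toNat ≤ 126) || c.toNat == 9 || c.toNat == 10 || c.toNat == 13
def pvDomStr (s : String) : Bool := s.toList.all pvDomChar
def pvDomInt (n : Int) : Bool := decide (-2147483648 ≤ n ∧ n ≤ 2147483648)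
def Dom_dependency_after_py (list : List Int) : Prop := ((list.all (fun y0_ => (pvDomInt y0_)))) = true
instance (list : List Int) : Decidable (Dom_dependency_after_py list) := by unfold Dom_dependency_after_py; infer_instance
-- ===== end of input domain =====

-- B replaces the index-arithmetic loop with slicing by iterator-grouping (consume the
-- list three at a time), same output; objective: idiomatic.


-- ===== PORT A =====
-- Literal port: for i in range(len//3): slice list[3i:3i+3] (always exactly 3 long for
-- i in range), turn it into a tuple appended after i+1 (its three components, read off in
-- order), append to the accumulator.
def dependency_after_py (list : List Int) : List (Int × Int × Int × Int) :=
  let len_list : Int := list.length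
  let rep : Int := PySem.Int.floordiv len_list 3
  (PySem.List.pyRange 0 rep 1).foldl
    (fun temp_list i =>
      let index := i * 3
      let tup2 := PySem.List.slice list (some index) (some (index + 3))
      temp_list ++ [(i + 1, tup2.getD 0 0, tup2.getD 1 0, tup2.getD 2 0)])
    []

-- ===== PORT B =====
-- Source B consumes the list through one shared iterator, three at a time, while
-- enumerate(…, 1) counts the emitted triples; ported as three-cons recursion with counter.
def pvAltGo (i : Int) : List Int → List (Int × Int × Int × Int)
  | a :: b :: c :: rest => (i, a, b, c) :: pvAltGo (i + 1) rest
  | _ => []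

def dependency_after_py_alt (list : List Int) : List (Int × Int × Int × Int) :=
  pvAltGo 1 list

-- ===== PRECONDITION & SPEC =====
def Spec_dependency_after_py (list : List Int) (out : List (Int × Int × Int × Int)) : Prop := out = dependency_after_py_alt list
instance (list : List Int) (out : List (Int × Int × Int × Int)) : Decidable (Spec_dependency_after_py list out) := by unfold Spec_dependency_after_py; infer_instance

-- ===== CLAIM (what is proved, stated in full; the proofs are below) =====
def Claim_equal_dependency_after_py : Prop := ∀ (list : List Int), Dom_dependency_after_py list → Spec_dependency_after_py list (dependency_after_py list)

-- ===== LEMMAS AND PROOFS =====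


-- three-at-a-time induction on a list (helper for the proofs below)
theorem pvTripleInd (motive : List Int → Prop)
    (h0 : motive []) (h1 : ∀ a, motive [a]) (h2 : ∀ a b, motive [a, b])
    (h3 : ∀ a b c rest, motive rest → motive (a :: b :: c :: rest)) :
    ∀ l, motive l
  | [] => h0
  | [a] => h1 a
  | [a, b] => h2 a b
  | a :: b :: c :: rest => h3 a b c rest (pvTripleInd motive h0 h1 h2 h3 rest)

-- A's fold, started at an arbitrary accumulator with the emitted index shifted by k,
-- generalised so induction can peel three elements at a time.
theorem depA_foldl_generalize (l : List Int) (acc : List (Int × Int × Int × Int)) (k : Int) :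
    (PySem.List.pyRange 0 ((l.length : Int) / 3) 1).foldl
      (fun temp_list i =>
        temp_list ++ [(i + 1 + k, (PySem.List.slice l (some (i * 3)) (some (i * 3 + 3))).getD 0 0,
          (PySem.List.slice l (some (i * 3)) (some (i * 3 + 3))).getD 1 0,
          (PySem.List.slice l (some (i * 3)) (some (i * 3 + 3))).getD 2 0)]) acc
    = acc ++ pvAltGo (1 + k) l := by
  induction l using pvTripleInd generalizing acc k with
  | h0 => simp [pvAltGo, PySem.List.pyRange_one_eq_nil]
  | h1 a => simp [pvAltGo]
  | h2 a b => simp [pvAltGo]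
  | h3 a b c rest ih =>
      have hnn : (0:Int) ≤ (rest.length : Int) / 3 :=
        Int.ediv_nonneg (by positivity) (by norm_num)
      have hlen : (((a :: b :: c :: rest).length : Int)) / 3 = (rest.length : Int) / 3 + 1 := by
        simp; omega
      rw [hlen, PySem.List.pyRange_one_cons (by omega)]
      simp only [List.foldl_cons]
      have h0' : PySem.List.slice (a :: b :: c :: rest) (some ((0:Int) * 3)) (some ((0:Int) * 3 + 3))
          = [a, b, c] := by
        have e1 : ((0:Int) * 3) = (((0:Nat) : Int)) := by norm_num
        have e2 : ((0:Int) * 3 + 3) = (((3:Nat) : Int)) := by norm_num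
        rw [e2, e1, PySem.List.slice_natCast]
        simp
      rw [h0']  -- (slice is [a,b,c]; getD reads a, b, c)
      have hshift : ∀ acc' : List (Int × Int × Int × Int),
          (PySem.List.pyRange (0 + 1) ((rest.length : Int) / 3 + 1) 1).foldl
            (fun temp_list i =>
              temp_list ++ [(i + 1 + k, (PySem.List.slice (a :: b :: c :: rest) (some (i * 3)) (some (i * 3 + 3))).getD 0 0,
                (PySem.List.slice (a :: b :: c :: rest) (some (i * 3)) (some (i * 3 + 3))).getD 1 0,
                (PySem.List.slice (a :: b :: c :: rest) (some (i * 3)) (some (i * 3 + 3))).getD 2 0)]) acc'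
          = (PySem.List.pyRange 0 ((rest.length : Int) / 3) 1).foldl
            (fun temp_list i =>
              temp_list ++ [(i + 1 + (k + 1), (PySem.List.slice rest (some (i * 3)) (some (i * 3 + 3))).getD 0 0,
                (PySem.List.slice rest (some (i * 3)) (some (i * 3 + 3))).getD 1 0,
                (PySem.List.slice rest (some (i * 3)) (some (i * 3 + 3))).getD 2 0)]) acc' := by
        intro acc' 
        have hr : PySem.List.pyRange (0 + 1) ((rest.length : Int) / 3 + 1) 1
            = (PySem.List.pyRange 0 ((rest.length : Int) / 3) 1).map (· + 1) := by
          rw [PySem.List.pyRange_one, PySem.List.pyRange_one]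
          simp only [List.map_map, Function.comp_def]
          have : ((rest.length : Int) / 3 + 1 - (0 + 1)) = ((rest.length : Int) / 3 - 0) := by ring
          rw [this]
          apply List.map_congr_left; intro x _; ring
        rw [hr, List.foldl_map]
        apply PySem.List.foldl_congr_mem
        intro tl i hi
        have hi' : 0 ≤ i := (PySem.List.mem_pyRange_one.mp hi).1
        have hsl : PySem.List.slice (a :: b :: c :: rest) (some ((i + 1) * 3)) (some ((i + 1) * 3 + 3))
            = PySem.List.slice rest (some (i * 3)) (some (i * 3 + 3)) := by
          obtain ⟨n, rfl⟩ := Int.eq_ofNat_of_zero_le hi'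
          have e1 : ((n : Int) + 1) * 3 = (((3 * n + 3 : Nat) : Int)) := by push_cast; ring
          have e2 : ((n : Int) + 1) * 3 + 3 = (((3 * n + 3 : Nat) : Int)) + ((3 : Nat) : Int) := by push_cast; ring
          have e3 : (n : Int) * 3 = (((3 * n : Nat) : Int)) := by push_cast; ring
          have e4 : (n : Int) * 3 + 3 = (((3 * n : Nat) : Int)) + ((3 : Nat) : Int) := by push_cast; ring
          rw [e2, e1, e4, e3, PySem.List.slice_natCast_add, PySem.List.slice_natCast_add]
          have h33 : (3 * n + 3) = 3 + 3 * n := by omega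
          rw [h33, ← List.drop_drop]
          rfl
        rw [hsl]
        have : i + 1 + 1 + k = i + 1 + (k + 1) := by ring
        rw [this]
      rw [hshift]
      have h2 := ih (acc ++ [(0 + 1 + k, a, b, c)]) (k + 1)
      have hk : (1 : Int) + (k + 1) = 0 + 1 + k + 1 := by ring
      rw [hk] at h2
      simp only [List.getD, List.getElem?_cons_zero, List.getElem?_cons_succ,
        Option.getD_some] at h2 ⊢
      rw [h2]
      simp [pvAltGo]

-- ===== VERDICT (by name: the statement is the Claim_ definition above) =====
theorem dependency_after_py_spec : Claim_equal_dependency_after_py := by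
  intro l _
  unfold Spec_dependency_after_py dependency_after_py dependency_after_py_alt
  simp only [PySem.Int.floordiv]
  rw [Int.fdiv_eq_ediv_of_nonneg _ (by norm_num)]
  have h := depA_foldl_generalize l [] 0
  simp only [add_zero] at h
  simpa using h
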